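-- pv_equiv track=rewrite | github.com/kingaser/programers_prac | 백준/Silver/19941. 햄버거 분배/햄버거 분배.py | solution
-- ===== SOURCE A (Python) =====
-- def solution(k, arr):
--     cnt = 0
--
--     for i in range(len(arr)):
--         if arr[i] == 'P':
--             for j in range(i - k, i + k + 1):
--                 if 0 <= j and j < len(arr) and arr[j] == 'H':
--                     cnt += 1
--                     arr[j] = ' '
--                     break
--
--     return cnt
-- ===== SOURCE B (Python) =====
-- def solution(k, arr):
--     hs = [i for i, c in enumerate(arr) if c == 'H']
--     cnt = 0
--     p = 0
--     for i, c in enumerate(arr):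
--         if c == 'P':
--             while p < len(hs) and hs[p] < i - k:
--                 p += 1
--             if p < len(hs) and hs[p] <= i + k:
--                 cnt += 1
--                 p += 1
--     return cnt
-- ===== Notes on version B (the rewrite author's own statement) =====
-- stated objective: alternative
-- what changed: Replaces A's per-'P' rescan of the whole window i-k..i+k of the mutated list by a single left-to-right pass with a monotone pointer into the precomputed list of 'H' positions; B does not mutate the input list.
import Mathlib
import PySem

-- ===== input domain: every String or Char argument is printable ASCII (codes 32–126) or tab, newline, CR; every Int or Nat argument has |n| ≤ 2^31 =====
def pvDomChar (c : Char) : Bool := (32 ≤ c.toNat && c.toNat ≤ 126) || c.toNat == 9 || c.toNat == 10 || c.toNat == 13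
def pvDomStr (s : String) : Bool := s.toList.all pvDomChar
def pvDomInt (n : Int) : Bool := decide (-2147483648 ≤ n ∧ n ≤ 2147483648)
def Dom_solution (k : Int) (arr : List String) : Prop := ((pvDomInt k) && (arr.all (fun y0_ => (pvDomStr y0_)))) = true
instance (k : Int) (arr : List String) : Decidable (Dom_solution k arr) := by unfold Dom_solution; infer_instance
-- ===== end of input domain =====

-- B replaces A's per-'P' window rescans of the mutated list by one pass with a monotone
-- pointer over the precomputed 'H' positions (objective: alternative algorithm). A mutates
-- arr in place ('H' → ' '), B does not; the equivalence proved is about the return value only.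

-- ===== PORT A =====
-- inner loop 'for j in range(i-k, i+k+1): …': fuel = number of range steps; returns the
-- matched index if any (at which A sets arr[j] = ' ' and breaks)
def solnInner (arrA : List String) (j : Int) (fuel : Nat) : Option Nat :=
  match fuel with
  | 0 => none
  | fuel + 1 =>
    if 0 ≤ j ∧ j < (arrA.length : Int) ∧ arrA.getD j.toNat "" = "H" then some j.toNat
    else solnInner arrA (j + 1) fuel

-- outer loop 'for i in range(len(arr))' over the mutating list arrA
def solnOuter (k : Int) (n : Nat) (arrA : List String) (i : Nat) (cnt : Int) : Int :=
  if i < n then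
    if arrA.getD i "" = "P" then
      match solnInner arrA ((i : Int) - k) ((((i : Int) + k + 1) - ((i : Int) - k)).toNat) with
      | some j => solnOuter k n (arrA.set j " ") (i + 1) (cnt + 1)
      | none => solnOuter k n arrA (i + 1) cnt
    else solnOuter k n arrA (i + 1) cnt
  else cnt
termination_by n - i

def solution (k : Int) (arr : List String) : Int :=
  solnOuter k arr.length arr 0 0

-- ===== PORT B =====
-- 'while p < len(hs) and hs[p] < i - k: p += 1' — the pointer is the remaining suffix
def altSkip (t : Int) : List Int → List Int
  | [] => []
  | h :: hs => if h < t then altSkip t hs else h :: hs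

-- 'for i, c in enumerate(arr): …'
def altLoop (k : Int) : List (Int × String) → List Int → Int → Int
  | [], _, cnt => cnt
  | (i, c) :: rest, hs, cnt =>
    if c = "P" then
      match altSkip (i - k) hs with
      | [] => altLoop k rest [] cnt
      | h :: tl =>
        if h ≤ i + k then altLoop k rest tl (cnt + 1)
        else altLoop k rest (h :: tl) cnt
    else altLoop k rest hs cnt

def solution_alt (k : Int) (arr : List String) : Int :=
  let hs := ((PySem.List.enumerate arr 0).filter (fun p => p.2 == "H")).map (fun p => p.1)
  altLoop k (PySem.List.enumerate arr 0) hs 0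

-- ===== PRECONDITION & SPEC =====
def Spec_solution (k : Int) (arr : List String) (out : Int) : Prop := out = solution_alt k arr
instance (k : Int) (arr : List String) (out : Int) : Decidable (Spec_solution k arr out) := by unfold Spec_solution; infer_instance

-- ===== CLAIM (what is proved, stated in full; the proofs are below) =====
def Claim_equal_solution : Prop := ∀ (k : Int) (arr : List String), Dom_solution k arr → Spec_solution k arr (solution k arr)

-- ===== LEMMAS AND PROOFS =====

-- characterisation of A's inner scan: a returned index is the FIRST 'H' from lo on
theorem getD_H_lt (arrA : List String) (j : Nat) (h : arrA.getD j "" = "H") :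
    j < arrA.length := by
  by_contra hl
  rw [List.getD_eq_default _ _ (by omega)] at h
  simp at h

theorem solnInner_some (arrA : List String) : ∀ (fuel : Nat) (lo : Int) (j : Nat),
    solnInner arrA lo fuel = some j →
    lo ≤ (j : Int) ∧ (j : Int) < lo + fuel ∧ j < arrA.length ∧ arrA.getD j "" = "H" ∧
      (∀ j' : Nat, lo ≤ (j' : Int) → (j' : Int) < (j : Int) → arrA.getD j' "" ≠ "H") := by
  intro fuel
  induction fuel with
  | zero => intro lo j h; simp [solnInner] at h
  | succ fuel ih =>
    intro lo j h
    simp only [solnInner] at h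
    split_ifs at h with hc
    · obtain ⟨h0, hlt, hH⟩ := hc
      have hj : (j : Int) = lo := by
        have := congrArg (fun o => o.getD 0) h
        simp at this
        omega
      refine ⟨by omega, by push_cast; omega, by omega, ?_, ?_⟩
      · rw [show j = lo.toNat by omega]; exact hH
      · intro j' h1 h2 _; omega
    · obtain ⟨h1, h2, h3, h4, h5⟩ := ih (lo + 1) j h
      refine ⟨?_, by push_cast at h2 ⊢; omega, h3, h4, ?_⟩
      · by_contra hlt
        have hj : (j : Int) = lo := by omega
        exact hc ⟨by omega, by omega, by rw [show lo.toNat = j by omega]; exact h4⟩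
      · intro j' hj1 hj2
        by_cases he : (j' : Int) = lo
        · intro hH
          exact hc ⟨by omega, by have := getD_H_lt arrA j' hH; omega,
            by rw [show lo.toNat = j' by omega]; exact hH⟩
        · exact h5 j' (by omega) hj2

theorem solnInner_none (arrA : List String) : ∀ (fuel : Nat) (lo : Int),
    solnInner arrA lo fuel = none →
    ∀ j : Nat, lo ≤ (j : Int) → (j : Int) < lo + fuel → arrA.getD j "" ≠ "H" := by
  intro fuel
  induction fuel with
  | zero => intro lo _ j h1 h2; push_cast at h2; omega
  | succ fuel ih =>
    intro lo h j h1 h2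
    simp only [solnInner] at h
    split_ifs at h with hc
    by_cases he : (j : Int) = lo
    · intro hH
      exact hc ⟨by omega, by have := getD_H_lt arrA j hH; omega,
        by rw [show lo.toNat = j by omega]; exact hH⟩
    · exact ih (lo + 1) h j (by omega) (by push_cast at h2 ⊢; omega)

theorem altSkip_suffix (t : Int) : ∀ hs : List Int, (altSkip t hs).IsSuffix hs := by
  intro hs
  induction hs with
  | nil => simp [altSkip]
  | cons h tl ih =>
    simp only [altSkip]
    split_ifs
    · exact ih.trans (List.suffix_cons h tl)
    · exact List.suffix_refl _

theorem altSkip_lt (t : Int) : ∀ (hs : List Int) (x : Int), x ∈ hs → x ∉ altSkip t hs → x < t := by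
  intro hs
  induction hs with
  | nil => simp
  | cons h tl ih =>
    intro x hx hnx
    simp only [altSkip] at hnx
    split_ifs at hnx with hc
    · rcases List.mem_cons.mp hx with rfl | hx'
      · exact hc
      · exact ih x hx' hnx
    · exact absurd hx hnx

theorem altSkip_head_ge (t : Int) : ∀ (hs : List Int) (h : Int) (tl : List Int),
    altSkip t hs = h :: tl → t ≤ h := by
  intro hs
  induction hs with
  | nil => intro h tl he; simp [altSkip] at he
  | cons h0 tl0 ih =>
    intro h tl he
    simp only [altSkip] at he
    split_ifs at he with hc
    · exact ih h tl he
    · cases he; omega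

-- the invariant tying A's mutated list to B's remaining pointer suffix after processing i items
def LoopInv (arr0 : List String) (k : Int) (i : Nat) (arrA : List String) (hs : List Int) : Prop :=
  arrA.length = arr0.length ∧
  (∀ j : Nat, j < arr0.length → (arrA.getD j "" = "P" ↔ arr0.getD j "" = "P")) ∧
  hs.Pairwise (· < ·) ∧
  (∀ h ∈ hs, ∃ j : Nat, h = (j : Int) ∧ j < arr0.length ∧ arrA.getD j "" = "H") ∧
  (∀ j : Nat, j < arr0.length → arrA.getD j "" = "H" → ((j : Int) ∈ hs ∨ (j : Int) < (i : Int) - k))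

-- getD after a set, at and away from the written index
theorem getD_set_self (l : List String) (j : Nat) (hj : j < l.length) :
    (l.set j " ").getD j "" = " " := by
  rw [List.getD_eq_getElem?_getD, List.getElem?_set_self hj]
  rfl

theorem getD_set_ne (l : List String) (j j' : Nat) (h : j' ≠ j) :
    (l.set j " ").getD j' "" = l.getD j' "" := by
  simp [List.getD_eq_getElem?_getD, List.getElem?_set_ne (by omega : j ≠ j')]

theorem main_lemma (arr0 : List String) (k : Int) :
    ∀ (m i : Nat) (arrA : List String) (hs : List Int) (cnt : Int),
      arr0.length - i = m → LoopInv arr0 k i arrA hs →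
      solnOuter k arr0.length arrA i cnt =
        altLoop k (PySem.List.enumerate (arr0.drop i) (i : Int)) hs cnt := by
  intro m
  induction m with
  | zero =>
    intro i arrA hs cnt hm _
    rw [solnOuter, List.drop_eq_nil_of_le (by omega)]
    simp [altLoop, PySem.List.enumerate_nil, if_neg (by omega : ¬ i < arr0.length)]
  | succ m ih =>
    intro i arrA hs cnt hm hinv
    obtain ⟨hL, hP, hPw, hmem, hcov⟩ := hinv
    have hi : i < arr0.length := by omega
    have hdrop : arr0.drop i = arr0[i] :: arr0.drop (i + 1) := List.drop_eq_getElem_cons hi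
    have hgd : arr0.getD i "" = arr0[i] := List.getD_eq_getElem _ _ hi
    have hcast : ((i : Int) + 1) = ((i + 1 : Nat) : Int) := by push_cast; ring
    rw [solnOuter, if_pos hi, hdrop, PySem.List.enumerate_cons]
    simp only [altLoop]
    by_cases hp : arr0.getD i "" = "P"
    case neg =>
      rw [if_neg (fun hh => hp ((hP i hi).mp hh)), if_neg (fun hh => hp (hgd ▸ hh)), hcast]
      exact ih (i + 1) arrA hs cnt (by omega) ⟨hL, hP, hPw, hmem, by
        intro j hj hH
        rcases hcov j hj hH with h | h
        · exact Or.inl h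
        · right; push_cast; omega⟩
    case pos =>
      rw [if_pos ((hP i hi).mpr hp), if_pos (hgd ▸ hp)]
      cases hhs' : altSkip ((i : Int) - k) hs with
      | nil =>
        have hall : ∀ x ∈ hs, x < (i : Int) - k := fun x hx =>
          altSkip_lt _ hs x hx (by simp [hhs'])
        have hnone : solnInner arrA ((i : Int) - k) ((((i : Int) + k + 1) - ((i : Int) - k)).toNat) = none := by
          cases res : solnInner arrA ((i : Int) - k) ((((i : Int) + k + 1) - ((i : Int) - k)).toNat) with
          | none => rfl
          | some j =>
            obtain ⟨r1, r2, r3, r4, r5⟩ := solnInner_some arrA _ _ _ res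
            rcases hcov j (by omega) r4 with h | h
            · have := hall _ h; omega
            · omega
        simp only [hnone, hcast]
        exact ih (i + 1) arrA [] cnt (by omega) ⟨hL, hP, List.Pairwise.nil, by simp, by
          intro j hj hH
          right
          rcases hcov j hj hH with h | h
          · have := hall _ h; push_cast; omega
          · push_cast; omega⟩
      | cons h tl =>
        have hsuf : (h :: tl).IsSuffix hs := hhs' ▸ altSkip_suffix ((i : Int) - k) hs
        have hhtl_pw : (h :: tl).Pairwise (· < ·) := hPw.sublist hsuf.sublist
        have hhge : (i : Int) - k ≤ h := altSkip_head_ge _ hs h tl hhs'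
        have hhmem : h ∈ hs := hsuf.subset (List.mem_cons_self)
        obtain ⟨jh, hjh, hjhlt, hjhH⟩ := hmem h hhmem
        have hmem_skip : ∀ x ∈ hs, (i : Int) - k ≤ x → x ∈ h :: tl := by
          intro x hx hxge
          by_contra hnx
          have := altSkip_lt ((i : Int) - k) hs x hx (hhs' ▸ hnx)
          omega
        by_cases hw : h ≤ (i : Int) + k
        · have hsome : solnInner arrA ((i : Int) - k) ((((i : Int) + k + 1) - ((i : Int) - k)).toNat) = some jh := by
            cases res : solnInner arrA ((i : Int) - k) ((((i : Int) + k + 1) - ((i : Int) - k)).toNat) with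
            | none =>
              exact absurd hjhH (solnInner_none arrA _ _ res jh (by omega) (by omega))
            | some j =>
              obtain ⟨r1, r2, r3, r4, r5⟩ := solnInner_some arrA _ _ _ res
              have hjhs : (j : Int) ∈ hs := by
                rcases hcov j (by omega) r4 with hc | hc
                · exact hc
                · omega
              have hhlej : h ≤ (j : Int) := by
                rcases List.mem_cons.mp (hmem_skip _ hjhs (by omega)) with he | hin
                · omega
                · have := (List.pairwise_cons.mp hhtl_pw).1 _ hin; omega
              have hjlejh : (j : Int) ≤ (jh : Int) := by
                by_contra hlt
                exact r5 jh (by omega) (by omega) hjhH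
              rw [show j = jh by omega]
          simp only [hsome, if_pos hw, hcast]
          refine ih (i + 1) (arrA.set jh " ") tl (cnt + 1) (by omega) ⟨by simpa using hL, ?_, ?_, ?_, ?_⟩
          · intro j hj
            by_cases he : j = jh
            · subst he
              rw [getD_set_self arrA j (by omega)]
              constructor
              · intro hc; exact absurd hc (by decide)
              · intro hc
                exact absurd ((hP j hj).mpr hc) (by rw [hjhH]; decide)
            · rw [getD_set_ne arrA jh j he]; exact hP j hj
          · exact hhtl_pw.sublist (List.sublist_cons_self h tl)
          · intro x hx
            obtain ⟨j', hj', hj'lt, hj'H⟩ := hmem x (hsuf.subset (List.mem_cons_of_mem h hx))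
            have hne : j' ≠ jh := by
              have := (List.pairwise_cons.mp hhtl_pw).1 _ hx
              omega
            exact ⟨j', hj', hj'lt, by rw [getD_set_ne arrA jh j' hne]; exact hj'H⟩
          · intro j hj hH
            have hne : j ≠ jh := by
              intro he
              rw [he, getD_set_self arrA jh (by omega)] at hH
              exact absurd hH (by decide)
            rw [getD_set_ne arrA jh j hne] at hH
            rcases hcov j hj hH with hc | hc
            · by_cases hge : (i : Int) - k ≤ (j : Int)
              · rcases List.mem_cons.mp (hmem_skip _ hc hge) with he | hin
                · exact absurd (by omega : j = jh) hne
                · exact Or.inl hin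
              · right; push_cast; omega
            · right; push_cast; omega
        · have hnone : solnInner arrA ((i : Int) - k) ((((i : Int) + k + 1) - ((i : Int) - k)).toNat) = none := by
            cases res : solnInner arrA ((i : Int) - k) ((((i : Int) + k + 1) - ((i : Int) - k)).toNat) with
            | none => rfl
            | some j =>
              obtain ⟨r1, r2, r3, r4, r5⟩ := solnInner_some arrA _ _ _ res
              have hjhs : (j : Int) ∈ hs := by
                rcases hcov j (by omega) r4 with hc | hc
                · exact hc
                · omega
              have hhlej : h ≤ (j : Int) := by
                rcases List.mem_cons.mp (hmem_skip _ hjhs (by omega)) with he | hin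
                · omega
                · have := (List.pairwise_cons.mp hhtl_pw).1 _ hin; omega
              omega
          simp only [hnone, if_neg hw, hcast]
          refine ih (i + 1) arrA (h :: tl) cnt (by omega) ⟨hL, hP, hhtl_pw,
            fun x hx => hmem x (hsuf.subset hx), ?_⟩
          intro j hj hH
          rcases hcov j hj hH with hc | hc
          · by_cases hge : (i : Int) - k ≤ (j : Int)
            · exact Or.inl (hmem_skip _ hc hge)
            · right; push_cast; omega
          · right; push_cast; omega

theorem init_inv (arr0 : List String) (k : Int) :
    LoopInv arr0 k 0 arr0
      (((PySem.List.enumerate arr0 0).filter (fun p => p.2 == "H")).map (fun p => p.1)) := by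
  refine ⟨rfl, fun j hj => Iff.rfl, ?_, ?_, ?_⟩
  · exact List.pairwise_map.mpr ((PySem.List.pairwise_lt_enumerate arr0 0).filter _)
  · intro h hh
    obtain ⟨p, hp, rfl⟩ := List.mem_map.mp hh
    have hpf := List.mem_filter.mp hp
    obtain ⟨j, hj, rfl⟩ := (PySem.List.mem_enumerate_iff _ _ _).mp hpf.1
    refine ⟨j, by push_cast; ring, hj, ?_⟩
    rw [List.getD_eq_getElem _ _ hj]
    simpa using hpf.2
  · intro j hj hH
    left
    apply List.mem_map.mpr
    refine ⟨((0 : Int) + j, arr0[j]), List.mem_filter.mpr ⟨(PySem.List.mem_enumerate_iff _ _ _).mpr ⟨j, hj, rfl⟩, ?_⟩, by simp⟩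
    rw [List.getD_eq_getElem _ _ hj] at hH
    simpa using hH

-- ===== VERDICT (by name: the statement is the Claim_ definition above) =====
theorem solution_spec : Claim_equal_solution := by
  intro k arr _
  unfold Spec_solution solution solution_alt
  have := main_lemma arr k arr.length 0 arr
    (((PySem.List.enumerate arr 0).filter (fun p => p.2 == "H")).map (fun p => p.1)) 0
    rfl (init_inv arr k)
  simpa using this
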